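/- GENERATED by tools/from_farm_form.py from prooffarm-gif/accepted/DGifDecreaseImageCounter.2/Lemmas.lean (a worked proof of the farm's unit `DGifDecreaseImageCounter.2`,
   accepted by the verdict) — do not edit. -/
import Gif.Spec.Units.DGifDecreaseImageCounter_2
import Gif.Spec.AllSegs

/-!
  Lemmas for the unit `DGifDecreaseImageCounter.2` (0x10a4b1 … 0x10a4f2, 16 instructions; dgif_lib.c:1161-1163): the address of the
  dropped slot again (`&gif.SavedImages[gif.ImageCount]`, two checked loads), the checked load of its `ImageDesc.ColorMap`, and
  `GifFreeMapObject(it)` if it is not NULL. The two cases of the ghost `g.cm` are walked separately: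

      dic2_sext        `movsxd rdx, [gif.ImageCount]`: the count, as a word
      dic2_slot        `lea rax, [rdx*8] ; sub rax, rdx ; lea rbp, [rbp + rax*8]`: `arr + 56 · n`, as a word
      dic2_none        `g.cm = none`: the field holds NULL, `je` taken; `AfterRaster` → `AfterMap` with the same heap
      dic2_some        `g.cm = some m`: the field holds `m.obj`; the call of `GifFreeMapObject` (both objects live and different:
                       `AfterRaster.owns`); `AfterRaster` → `AfterMap` with the heap `(Hc.release m.colors).release m.obj`

  The general lemmas: Gif/Spec/Common.lean §5b (`Loose.stack .header .shadow`, `Shape.sameExcept`, `rem_sameExcept`), §2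
  (`Owns.release_head`), Gif/Spec/FrameCarry.lean (`store_stack`).
-/

open X86 X86.User Asan ProgX.Base ProgX.Base.Spec Gif.Spec

set_option maxRecDepth 4000
set_option maxHeartbeats 4000000

namespace Gif.Spec.DGifDecreaseImageCounter_2

/-- `movsxd rdx, [gif.ImageCount]` of a count below `2 ^ 31`: the count. -/
theorem dic2_sext (n : Nat) (h : n < 2 ^ 31) :
    Word.ofBV (BitVec.signExtend 64 (BitVec.ofNat 32 n)) = UInt64.ofNat n := by
  have e : (BitVec.ofNat 32 n).toNat = n := by
    rw [BitVec.toNat_ofNat]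
    omega
  have h' : (BitVec.ofNat 32 n).toNat < 2 ^ 31 := by
    rw [e]
    exact h
  rw [sext32_bv _ h', e]

/-- `&SavedImages[n]` as gcc computes it (`lea rax, [rdx*8] ; sub rax, rdx ; lea rbp, [rbp + rax*8]`): `arr + 56 n`. -/
theorem dic2_slot (a n : Nat) :
    UInt64.ofNat a + (UInt64.ofNat n * 8 - UInt64.ofNat n) * 8 = UInt64.ofNat (a + 56 * n) := by
  apply UInt64.toNat_inj.mp
  have e8 : (8 : UInt64).toNat = 8 := rfl
  rw [UInt64.toNat_add, UInt64.toNat_mul, UInt64.toNat_sub, UInt64.toNat_mul, e8]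
  simp only [UInt64.toNat_ofNat']
  omega

/-- **10A4B1H … 10A4F2H, the dropped image has NO colour map** (dgif_lib.c:1161 `if (sp->ImageDesc.ColorMap != NULL)`, false): the
three checked loads, `test rdi, rdi ; je` taken. Only the checks' return address was stored (below the stack pointer): the heap is
the same, and what `AfterRaster` owns besides the forest is nothing. -/
theorem dic2_none (Lay : Layout) (hLay : Lay.hi = 0x1000000) (μ : Microarch) (hμ : UserX.MicroOK μ) (u₀ : State)
    (hcode : HasCodeNat Lay u₀ Gif.L.DGifDecreaseImageCounter.entry Gif.Code.code_DGifDecreaseImageCounter.nat Gif.L.DGifDecreaseImageCounter.size)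
    (h_asan_load8_noabort : Asan.SmallCheck Lay μ ProgX.Base.WayInv (ProgX.Base.CodeOK u₀) [.rax, .rcx, .rdx] 8 ProgX.Base.L.__asan_load8_noabort.entry)
    (h_asan_load4_noabort : Asan.SmallCheck Lay μ ProgX.Base.WayInv (ProgX.Base.CodeOK u₀) [.rax, .rcx, .rdx] 4 ProgX.Base.L.__asan_load4_noabort.entry)
    (H : Heap) (rest : List Obj) (frames : List (Nat × FrameLayout)) (F : Forest) (R : Rd) (init : List Img) (g : Img)
    (s : Saved) (Hc : Heap) (e : State) (ret : Word) (v : State)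
    (hat : DGifDecreaseImageCounter.AfterRaster H rest frames F R init g s Hc u₀ e ret v) (hcm : g.cm = none) :
    ReachVia Lay μ ProgX.Base.WayInv v (fun w => ∃ Hc', DGifDecreaseImageCounter.AfterMap H rest frames F R init g s Hc' u₀ e ret w) := by
  have he := hat.entry
  v_entry he
  obtain ⟨henv, hrdi, himgs, hgext⟩ := hat.pre
  have w_rip := hat.rip
  have c_rsp : v.reg .rsp = e.reg .rsp - 24 := hat.rsp
  have c_rbx : v.reg .rbx = e.reg .rdi := hat.rbx
  have w_kept : RegsKept [.rsp] v v := RegsKept.refl _ _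
  have w_eq : Mem.EqOn ProgX.Base.L.textLo ProgX.Base.L.textHi u₀.mem v.mem := ProgX.Base.conv_code_eqOn hat.code
  have hdf := (show abiInv _ from hat.abi).1
  have hmx := (show abiInv _ from hat.abi).2
  have hsse := ProgX.Base.sseOK_of_abiInv hat.abi
  have k_rbp : v.mem.readLE (e.reg .rsp - 8) 8 = (e.reg .rbp).toNat := hat.slot_rbp
  have k_rbx : v.mem.readLE (e.reg .rsp - 16) 8 = (e.reg .rbx).toNat := hat.slot_rbx
  have k_ra : UInt64.ofNat (v.mem.readLE (e.reg .rsp) 8) = ret := hat.slot_ra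
  have hcur := henv.ctx.cursor_range henv.heap.inv.shadow
  -- where gif and the array are
  have hbase : Hc.base = 0x800000 := hat.region.1.trans henv.heap.base
  have hlimit : Hc.limit = 0xC00000 := hat.region.2.trans henv.heap.limit
  have hgmem : ((F.gif, 120) : Nat × Nat) ∈ Map.objs g.cm ++ (DGifDecreaseImageCounter.dropped F s init).owned :=
    List.mem_append_right _ List.mem_cons_self
  have hgin := hat.owns.inside hat.inv.heap hgmem
  simp only at hgin
  rw [hbase] at hgin
  have hgin1 := hgin.1
  have hgin5 := hgin.2.2.2.2
  clear hgin
  have hgl : Hc.Live F.gif 120 := hat.owns.live _ hgmem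
  have hamem : ((s.arr, 56 * s.cap) : Nat × Nat) ∈ Map.objs g.cm ++ (DGifDecreaseImageCounter.dropped F s init).owned := by
    apply List.mem_append_right
    unfold Forest.owned DGifDecreaseImageCounter.dropped
    simp only [Saved.objs, List.mem_cons, List.mem_append, true_or, or_true]
  have hain := hat.owns.inside hat.inv.heap hamem
  simp only at hain
  rw [hbase] at hain
  have hain1 := hain.1
  have hain5 := hain.2.2.2.2
  clear hain
  have hal : Hc.Live s.arr (56 * s.cap) := hat.owns.live _ hamem
  -- the dropped slot lies inside the array's capacity: the entry's count `init.length + 1` is at most `s.cap`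
  have hlen : init.length + 1 ≤ s.cap := by
    have h := henv.ok.shape.saved
    rw [hat.saved] at h
    obtain ⟨_, _, hle, _, _⟩ := h
    rw [hat.imgs, List.length_append] at hle
    exact hle
  -- the counted images
  obtain ⟨hsp, hsc, hsle, hscap, hslots⟩ : SavedAt (some { s with imgs := init }) (GifFileType.SavedImages v.mem F.gif)
      (GifFileType.ImageCount v.mem F.gif) v.mem := hat.shape.saved
  simp only [gfield] at hsp hsc
  have l_arr : v.mem.readLE (e.reg .rdi + 0x48) 8 = s.arr := by
    rw [rd_eq_readLE v.mem _ (F.gif + 72) 8 (by u_omega)]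
    exact hsp
  have l_cnt : v.mem.readLE (e.reg .rdi + 0x20) 4 = init.length := by
    rw [rd_eq_readLE v.mem _ (F.gif + 32) 4 (by u_omega)]
    exact hsc
  have hsx := dic2_sext init.length (by omega)
  have hslot := dic2_slot s.arr init.length
  have hcmv := hat.cm
  rw [hcm] at hcmv
  simp only [MapAt, gfield] at hcmv
  have l_cm : v.mem.readLE (UInt64.ofNat (s.arr + 56 * init.length) + 0x18) 8 = 0 := by
    rw [rd_eq_readLE v.mem _ (s.arr + 56 * init.length + 24) 8 (by u_omega)]
    exact hcmv
  u_walk hcode [hμ.vendor, hsx, hslot] until [Gif.L.DGifDecreaseImageCounter.at_10a4f2] span [ProgX.Base.L.textLo, ProgX.Base.L.textHi] side (v_side)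
  case check_10a4b5 =>
    -- 0x10a4b5 (dgif_lib.c:1161): the load of `gif.SavedImages` lies inside gif
    have hun : ShadowUntouched v.mem s_10a4b5.mem := by v_untouched
    have hl : LiveIn (Hc.liveObjs ++ rest) frames F.gif 120 := hgl.liveIn rest frames (Nat.le_refl _) (Nat.le_refl _)
    exact hl.accSmall hat.inv.shadow hun _ 8 (by decide) (by u_omega) (by u_omega)
  case check_10a4c2 =>
    -- 0x10a4c2 (dgif_lib.c:1161): the load of `gif.ImageCount` lies inside gif
    have hun : ShadowUntouched v.mem s_10a4c2.mem := by v_untouched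
    have hl : LiveIn (Hc.liveObjs ++ rest) frames F.gif 120 := hgl.liveIn rest frames (Nat.le_refl _) (Nat.le_refl _)
    exact hl.accSmall hat.inv.shadow hun _ 4 (by decide) (by u_omega) (by u_omega)
  case check_10a4df =>
    -- 0x10a4df (dgif_lib.c:1161): the load of the dropped slot's `ImageDesc.ColorMap` lies inside the array's capacity
    have hun : ShadowUntouched v.mem s_10a4df.mem := by v_untouched
    have hl : LiveIn (Hc.liveObjs ++ rest) frames s.arr (56 * s.cap) := hal.liveIn rest frames (Nat.le_refl _) (Nat.le_refl _)
    exact hl.accSmall hat.inv.shadow hun _ 8 (by decide) (by u_omega) (by u_omega)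
  -- 0x10a4f2 (dgif_lib.c:1166), `je` taken: the slot has no colour map; only the checks' return address was stored
  have howns : Owns Hc (DGifDecreaseImageCounter.dropped F s init).owned := by
    have h := hat.owns
    rw [hcm] at h
    exact h
  obtain ⟨hinvA, hokA, hremA⟩ := store_stack hat.inv ⟨howns, hat.shape⟩ ⟨hcur.1, hcur.2.1⟩ (e.reg .rsp - 32) 8 1090788
    (by u_omega) (by u_omega)
  rw [← w_mem] at hinvA hokA hremA
  refine ReachVia.done ⟨Hc, ?_⟩
  exact {
    entry := hat.entry
    pre := hat.pre
    saved := hat.saved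
    imgs := hat.imgs
    rip := w_rip
    rsp := w_rsp
    rbx := (w_kept.get .rbx rfl).trans hat.rbx
    r12 := (w_kept.get .r12 rfl).trans hat.r12
    r13 := (w_kept.get .r13 rfl).trans hat.r13
    r14 := (w_kept.get .r14 rfl).trans hat.r14
    r15 := (w_kept.get .r15 rfl).trans hat.r15
    slot_rbp := by
      rw [w_mem]
      u_frame k_rbp
    slot_rbx := by
      rw [w_mem]
      u_frame k_rbx
    slot_ra := by
      rw [w_mem]
      u_frame k_ra
    region := hat.region
    inv := hinvA
    ok := hokA
    rem := hremA.trans hat.rem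
    same := by
      have hsame := hat.same
      rw [w_mem]
      u_same
    code := ProgX.Base.conv_code_in w_eq
    abi := by
      refine ProgX.Base.abiInv_of ?_ ?_
      · rw [w_flags, X86.User.df_setStatus]
        exact w_df_10a4df
      · rw [w_mxcsr]
        exact hmx
  }

/-- **10A4B1H … 10A4F2H, the dropped image HAS a colour map `m`** (dgif_lib.c:1161-1162): the three checked loads, `rdi = m.obj`
is not NULL, `GifFreeMapObject(m.obj)` frees the colour array and the map object (both owned besides the forest: `AfterRaster.owns`).
Its footprint (stack, two header words, shadow) is loose for the forest without the dropped image: the shape is kept, the forest's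
objects stay live in `(Hc.release m.colors).release m.obj`. -/
theorem dic2_some (Lay : Layout) (hLay : Lay.hi = 0x1000000) (μ : Microarch) (hμ : UserX.MicroOK μ) (u₀ : State)
    (hcode : HasCodeNat Lay u₀ Gif.L.DGifDecreaseImageCounter.entry Gif.Code.code_DGifDecreaseImageCounter.nat Gif.L.DGifDecreaseImageCounter.size)
    (h_asan_load8_noabort : Asan.SmallCheck Lay μ ProgX.Base.WayInv (ProgX.Base.CodeOK u₀) [.rax, .rcx, .rdx] 8 ProgX.Base.L.__asan_load8_noabort.entry)
    (h_asan_load4_noabort : Asan.SmallCheck Lay μ ProgX.Base.WayInv (ProgX.Base.CodeOK u₀) [.rax, .rcx, .rdx] 4 ProgX.Base.L.__asan_load4_noabort.entry)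
    (H : Heap) (rest : List Obj) (frames : List (Nat × FrameLayout)) (F : Forest) (R : Rd) (init : List Img) (g : Img)
    (s : Saved) (Hc : Heap) (e : State) (ret : Word) (v : State)
    (h_GifFreeMapObject : ∀ (H : Heap) (rest : List Obj) (frames : List (Nat × FrameLayout)) (colors n : Nat), Calls Lay μ ProgX.Base.WayInv (ProgX.Base.conv u₀) Gif.L.GifFreeMapObject.entry (Gif.Spec.GifFreeMapObject.spec H rest frames colors n))
    (hat : DGifDecreaseImageCounter.AfterRaster H rest frames F R init g s Hc u₀ e ret v) (m : Map) (hcm : g.cm = some m) :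
    ReachVia Lay μ ProgX.Base.WayInv v (fun w => ∃ Hc', DGifDecreaseImageCounter.AfterMap H rest frames F R init g s Hc' u₀ e ret w) := by
  have he := hat.entry
  v_entry he
  obtain ⟨henv, hrdi, himgs, hgext⟩ := hat.pre
  have w_rip := hat.rip
  have c_rsp : v.reg .rsp = e.reg .rsp - 24 := hat.rsp
  have c_rbx : v.reg .rbx = e.reg .rdi := hat.rbx
  have w_kept : RegsKept [.rsp] v v := RegsKept.refl _ _
  have w_eq : Mem.EqOn ProgX.Base.L.textLo ProgX.Base.L.textHi u₀.mem v.mem := ProgX.Base.conv_code_eqOn hat.code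
  have hdf := (show abiInv _ from hat.abi).1
  have hmx := (show abiInv _ from hat.abi).2
  have hsse := ProgX.Base.sseOK_of_abiInv hat.abi
  have k_rbp : v.mem.readLE (e.reg .rsp - 8) 8 = (e.reg .rbp).toNat := hat.slot_rbp
  have k_rbx : v.mem.readLE (e.reg .rsp - 16) 8 = (e.reg .rbx).toNat := hat.slot_rbx
  have k_ra : UInt64.ofNat (v.mem.readLE (e.reg .rsp) 8) = ret := hat.slot_ra
  have hcur := henv.ctx.cursor_range henv.heap.inv.shadow
  -- where gif and the array are
  have hbase : Hc.base = 0x800000 := hat.region.1.trans henv.heap.base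
  have hlimit : Hc.limit = 0xC00000 := hat.region.2.trans henv.heap.limit
  have hgmem : ((F.gif, 120) : Nat × Nat) ∈ Map.objs g.cm ++ (DGifDecreaseImageCounter.dropped F s init).owned :=
    List.mem_append_right _ List.mem_cons_self
  have hgin := hat.owns.inside hat.inv.heap hgmem
  simp only at hgin
  rw [hbase] at hgin
  have hgin1 := hgin.1
  have hgin5 := hgin.2.2.2.2
  clear hgin
  have hgl : Hc.Live F.gif 120 := hat.owns.live _ hgmem
  have hamem : ((s.arr, 56 * s.cap) : Nat × Nat) ∈ Map.objs g.cm ++ (DGifDecreaseImageCounter.dropped F s init).owned := by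
    apply List.mem_append_right
    unfold Forest.owned DGifDecreaseImageCounter.dropped
    simp only [Saved.objs, List.mem_cons, List.mem_append, true_or, or_true]
  have hain := hat.owns.inside hat.inv.heap hamem
  simp only at hain
  rw [hbase] at hain
  have hain1 := hain.1
  have hain5 := hain.2.2.2.2
  clear hain
  have hal : Hc.Live s.arr (56 * s.cap) := hat.owns.live _ hamem
  -- the dropped slot lies inside the array's capacity: the entry's count `init.length + 1` is at most `s.cap`
  have hlen : init.length + 1 ≤ s.cap := by
    have h := henv.ok.shape.saved
    rw [hat.saved] at h
    obtain ⟨_, _, hle, _, _⟩ := h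
    rw [hat.imgs, List.length_append] at hle
    exact hle
  -- the counted images
  obtain ⟨hsp, hsc, hsle, hscap, hslots⟩ : SavedAt (some { s with imgs := init }) (GifFileType.SavedImages v.mem F.gif)
      (GifFileType.ImageCount v.mem F.gif) v.mem := hat.shape.saved
  simp only [gfield] at hsp hsc
  have l_arr : v.mem.readLE (e.reg .rdi + 0x48) 8 = s.arr := by
    rw [rd_eq_readLE v.mem _ (F.gif + 72) 8 (by u_omega)]
    exact hsp
  have l_cnt : v.mem.readLE (e.reg .rdi + 0x20) 4 = init.length := by
    rw [rd_eq_readLE v.mem _ (F.gif + 32) 4 (by u_omega)]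
    exact hsc
  have hsx := dic2_sext init.length (by omega)
  have hslot := dic2_slot s.arr init.length
  have hcmv := hat.cm
  rw [hcm] at hcmv
  obtain ⟨hcp, hccnt, hccol, hc1, hc256⟩ := hcmv
  simp only [gfield] at hcp
  have l_cm : v.mem.readLE (UInt64.ofNat (s.arr + 56 * init.length) + 0x18) 8 = m.obj := by
    rw [rd_eq_readLE v.mem _ (s.arr + 56 * init.length + 24) 8 (by u_omega)]
    exact hcp
  -- the two objects of the colour map: owned besides the forest's
  have howns : Owns Hc ((m.obj, 24) :: (m.colors, 3 * m.count) :: (DGifDecreaseImageCounter.dropped F s init).owned) := by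
    have h := hat.owns
    rw [hcm] at h
    exact h
  have hol : Hc.Live m.obj 24 := howns.live (m.obj, 24) List.mem_cons_self
  have hcl : Hc.Live m.colors (3 * m.count) := howns.live (m.colors, 3 * m.count) (List.mem_cons_of_mem _ List.mem_cons_self)
  have hoin := howns.inside hat.inv.heap (o := (m.obj, 24)) List.mem_cons_self
  simp only at hoin
  rw [hbase] at hoin
  have hoin1 := hoin.1
  have hoin5 := hoin.2.2.2.2
  clear hoin
  have ho64 : (UInt64.ofNat m.obj).toNat = m.obj := toNat_ofNat_addr m.obj (by omega)
  have hne : m.obj ≠ m.colors := (List.pairwise_cons.mp howns.apart).1 (m.colors, 3 * m.count) List.mem_cons_self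
  have hccol' := hccol
  simp only [gfield] at hccol'
  have hfm := h_GifFreeMapObject Hc rest frames m.colors (3 * m.count)
  u_walk hcode [hμ.vendor, hsx, hslot] until [Gif.L.DGifDecreaseImageCounter.at_10a4f2] span [ProgX.Base.L.textLo, ProgX.Base.L.textHi] side (v_side)
  case check_10a4b5 =>
    -- 0x10a4b5 (dgif_lib.c:1161): the load of `gif.SavedImages` lies inside gif
    have hun : ShadowUntouched v.mem s_10a4b5.mem := by v_untouched
    have hl : LiveIn (Hc.liveObjs ++ rest) frames F.gif 120 := hgl.liveIn rest frames (Nat.le_refl _) (Nat.le_refl _)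
    exact hl.accSmall hat.inv.shadow hun _ 8 (by decide) (by u_omega) (by u_omega)
  case check_10a4c2 =>
    -- 0x10a4c2 (dgif_lib.c:1161): the load of `gif.ImageCount` lies inside gif
    have hun : ShadowUntouched v.mem s_10a4c2.mem := by v_untouched
    have hl : LiveIn (Hc.liveObjs ++ rest) frames F.gif 120 := hgl.liveIn rest frames (Nat.le_refl _) (Nat.le_refl _)
    exact hl.accSmall hat.inv.shadow hun _ 4 (by decide) (by u_omega) (by u_omega)
  case check_10a4df =>
    -- 0x10a4df (dgif_lib.c:1161): the load of the dropped slot's `ImageDesc.ColorMap` lies inside the array's capacity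
    have hun : ShadowUntouched v.mem s_10a4df.mem := by v_untouched
    have hl : LiveIn (Hc.liveObjs ++ rest) frames s.arr (56 * s.cap) := hal.liveIn rest frames (Nat.le_refl _) (Nat.le_refl _)
    exact hl.accSmall hat.inv.shadow hun _ 8 (by decide) (by u_omega) (by u_omega)
  case call_inv =>
    v_inv
  case pre_10a4ed =>
    -- 0x10a4ed (dgif_lib.c:1162) `GifFreeMapObject(sp->ImageDesc.ColorMap)`: the heap's invariant over the pushed return
    -- address; the map object and its colour array are live, different, and the object's `Colors` field holds the array
    have e_rsp : (s_10a4ed.reg .rsp).toNat + 8 = (e.reg .rsp).toNat - 24 := by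
      rw [w_rsp]
      u_omega
    refine ⟨⟨?_, hbase, hlimit, henv.heap.text, henv.heap.offText⟩, Or.inr ⟨?_, hcl, ?_, ?_⟩⟩
    · rw [e_rsp, w_mem]
      exact hat.inv.writeLE_out _ _ _ (by u_omega) (by rw [hbase]; left; u_omega) (by left; u_omega)
    · rw [w_rdi, ho64]
      exact hol
    · rw [w_rdi, ho64]
      exact Ne.symm hne
    · rw [w_rdi, ho64, w_mem]
      simp only [gfield]
      rw [rd_writeLE_disjoint _ _ _ _ _ _ (by u_omega) (by omega) (by u_omega)]
      exact hccol'
  -- 0x10a4f2 (ret8): `GifFreeMapObject` has returned: the heap is `(Hc.release m.colors).release m.obj`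
  have hne2 : (s_10a4ed.reg .rdi).toNat ≠ 0 := by
    rw [w_rdi_10a4ed, ho64]
    omega
  have hinv2 := w_post.2 hne2
  rw [w_rdi_10a4ed, ho64] at hinv2
  clear w_post
  have e_top : (s_10a4ed.reg .rsp).toNat + 8 = (e.reg .rsp).toNat - 24 := by
    rw [w_rsp_10a4ed]
    u_omega
  rw [e_top] at hinv2
  -- the callee's footprint over `v.mem`
  v_after_call w_rsp_10a4ed w_mem_10a4ed
  simp only [shadowSpan, w_rdi_10a4ed, ho64] at w_same
  clear he_align
  -- where the colour array is
  have hcin := howns.inside hat.inv.heap (o := (m.colors, 3 * m.count)) (List.mem_cons_of_mem _ List.mem_cons_self)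
  simp only at hcin
  rw [hbase] at hcin
  have hcin1 := hcin.1
  have hcin5 := hcin.2.2.2.2
  clear hcin
  -- the saved registers and the return address, over the pushed return address and through the callee's footprint
  have hpbp : s_10a4ed.mem.readLE (e.reg .rsp - 8) 8 = (e.reg .rbp).toNat := by
    rw [w_mem_10a4ed]
    u_frame k_rbp
  rw [w_mem_10a4ed] at hpbp
  have hsbp : s_10a4edr.mem.readLE (e.reg .rsp - 8) 8 = (e.reg .rbp).toNat := by u_frame hpbp
  have hpbx : s_10a4ed.mem.readLE (e.reg .rsp - 16) 8 = (e.reg .rbx).toNat := by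
    rw [w_mem_10a4ed]
    u_frame k_rbx
  rw [w_mem_10a4ed] at hpbx
  have hsbx : s_10a4edr.mem.readLE (e.reg .rsp - 16) 8 = (e.reg .rbx).toNat := by u_frame hpbx
  have hpra : UInt64.ofNat (s_10a4ed.mem.readLE (e.reg .rsp) 8) = ret := by
    rw [w_mem_10a4ed]
    u_frame k_ra
  rw [w_mem_10a4ed] at hpra
  have hsra : UInt64.ofNat (s_10a4edr.mem.readLE (e.reg .rsp) 8) = ret := by u_frame hpra
  -- the footprint since the cut: the stack below the function's `rsp`, the two headers' state words, the two objects' shadow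
  have hs : Mem.SameExcept
    [⟨(e.reg .rsp).toNat - 80, (e.reg .rsp).toNat - 24⟩,
     ⟨m.colors - 24, m.colors - 16⟩,
     ⟨0xC00000 + m.colors / 8, 0xC00000 + (m.colors + 3 * m.count + 7) / 8⟩,
     ⟨m.obj - 24, m.obj - 16⟩,
     ⟨0xC00000 + m.obj / 8, 0xC00000 + (m.obj + 24 + 7) / 8⟩] v.mem s_10a4edr.mem := by u_same
  -- every window of that footprint is loose for the forest without the dropped image: a gap of the heap
  have hok := hat.inv.heap
  have hcur2 : 0x700000 ≤ R.cur ∧ R.cur + 16 ≤ 0x800000 := ⟨hcur.1, hcur.2.1⟩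
  obtain ⟨ocap, holc⟩ := hol
  obtain ⟨ccap, hclc⟩ := hcl
  have hloose : ∀ w, w ∈
      [(⟨(e.reg .rsp).toNat - 80, (e.reg .rsp).toNat - 24⟩ : Span),
       ⟨m.colors - 24, m.colors - 16⟩,
       ⟨0xC00000 + m.colors / 8, 0xC00000 + (m.colors + 3 * m.count + 7) / 8⟩,
       ⟨m.obj - 24, m.obj - 16⟩,
       ⟨0xC00000 + m.obj / 8, 0xC00000 + (m.obj + 24 + 7) / 8⟩] →
      Loose Hc (DGifDecreaseImageCounter.dropped F s init) R w := by
    intro w hw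
    simp only [List.mem_cons, List.not_mem_nil, or_false] at hw
    rcases hw with rfl | rfl | rfl | rfl | rfl
    · apply Loose.stack hok
      · simp only
        omega
      · simp only
        omega
      · simp only
        omega
    · apply Loose.header hok hcur2 hclc
      · simp only
        omega
      · simp only
        omega
    · apply Loose.shadow hok hcur2.2
      simp only
      omega
    · apply Loose.header hok hcur2 holc
      · simp only
        omega
      · simp only
        omega
    · apply Loose.shadow hok hcur2.2
      simp only
      omega
  -- the forest without the dropped image: its objects stay live through the two `free`s, its shape is untouched
  have hown0 : Owns Hc (DGifDecreaseImageCounter.dropped F s init).owned := howns.of_cons.2.1.of_cons.2.1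
  have hown2 : Owns ((Hc.release m.colors).release m.obj) (DGifDecreaseImageCounter.dropped F s init).owned :=
    (howns.perm (List.Perm.swap _ _ _)).release_head.release_head
  have hshape : Shape (DGifDecreaseImageCounter.dropped F s init) R s_10a4edr.mem :=
    hat.shape.sameExcept (hown0.placed hok) hok hcur2 hs hloose
  have hrem : rem R s_10a4edr.mem = rem R v.mem := by
    apply rem_sameExcept hs (by omega)
    intro w hw
    simp only [List.mem_cons, List.not_mem_nil, or_false] at hw
    rcases hw with rfl | rfl | rfl | rfl | rfl
    · simp only
      omega
    · simp only
      omega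
    · simp only
      omega
    · simp only
      omega
    · simp only
      omega
  have hsame := hat.same
  -- THE EXIT ASSERTION at 0x10a4f2 (dgif_lib.c:1166)
  refine ReachVia.done ⟨(Hc.release m.colors).release m.obj, ?_⟩
  exact {
    entry := hat.entry
    pre := hat.pre
    saved := hat.saved
    imgs := hat.imgs
    rip := w_rip
    rsp := w_rsp
    rbx := (w_kept.get .rbx rfl).trans hat.rbx
    r12 := (w_kept.get .r12 rfl).trans hat.r12
    r13 := (w_kept.get .r13 rfl).trans hat.r13
    r14 := (w_kept.get .r14 rfl).trans hat.r14
    r15 := (w_kept.get .r15 rfl).trans hat.r15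
    slot_rbp := hsbp
    slot_rbx := hsbx
    slot_ra := hsra
    region := hat.region.trans ((SameRegion.release Hc m.colors).trans (SameRegion.release _ m.obj))
    inv := hinv2
    ok := ⟨hown2, hshape⟩
    rem := hrem.trans hat.rem
    same := by u_same
    code := w_code
    abi := w_inv
  }

end Gif.Spec.DGifDecreaseImageCounter_2
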